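-- pv_equiv track=rewrite | github.com/nename/school | Bachelors/chessboardDetectionHoughlines.py | find_similar_lines
-- ===== SOURCE A (Python) =====
-- def find_similar_lines(lines, gap, key):
--     """
--     Function finds similar lines.
--
--     :param lines: lines
--     :param gap: gap of the lines
--     :param key: marking of horizontal or vertical line
--     :return: arrays of indexes of similar lines
--     """
--     similar = []
--
--     for i in range(len(lines)):
--         indexes = [i]
--         for j in range(len(lines)):
--             if lines[i] == lines[j]:
--                 continue
--             if (lines[i][key]) - gap <= lines[j][key] <= (lines[i][key]) + gap and lines[i][key + 2] - gap <= \
--                     lines[j][key + 2] <= lines[i][key + 2] + gap: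
--                 indexes.append(j)
--
--         similar.append(indexes)
--
--     return similar
-- ===== SOURCE B (Python) =====
-- def _bisect_left(a, x):
--     lo, hi = 0, len(a)
--     while lo < hi:
--         mid = (lo + hi) // 2
--         if a[mid] < x:
--             lo = mid + 1
--         else:
--             hi = mid
--     return lo
--
--
-- def _bisect_right(a, x):
--     lo, hi = 0, len(a)
--     while lo < hi:
--         mid = (lo + hi) // 2
--         if x < a[mid]:
--             hi = mid
--         else:
--             lo = mid + 1
--     return lo
--
--
-- def find_similar_lines(lines, gap, key):
--     """Sort the indexes by the key coordinate once; for each line binary-search the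
--     contiguous candidate window, filter it on the second coordinate, restore index order."""
--     n = len(lines)
--     order = sorted(range(n), key=lambda k: lines[k][key])
--     coords = [lines[k][key] for k in order]
--     similar = []
--     for i in range(n):
--         c, c2 = lines[i][key], lines[i][key + 2]
--         lo = _bisect_left(coords, c - gap)
--         hi = _bisect_right(coords, c + gap)
--         kept = [j for j in order[lo:hi]
--                 if lines[j] != lines[i] and c2 - gap <= lines[j][key + 2] <= c2 + gap]
--         kept.sort()
--         similar.append([i] + kept)
--     return similar
-- ===== Notes on version B (the rewrite author's own statement) =====
-- stated objective: faster
-- what changed: A compares every ordered pair of lines per row (full n*n scan for each i); B sorts the indexes by the key coordinate once, binary-searches the contiguous [c-gap, c+gap] candidate window for each line, filters only that window on the second coordinate and re-sorts the kept indexes, so the inner full scan disappears.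
-- outside the precondition, e.g. on find_similar_lines([(0, 0, 0, 0), (0, 0, 0, 0)], 1, 100): A returns [[0], [1]], B raises IndexError; on find_similar_lines([(0, 0, 0, 0), (9, 9, 9, 9)], 1, 2): A returns [[0], [1]], B raises IndexError
import Mathlib
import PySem

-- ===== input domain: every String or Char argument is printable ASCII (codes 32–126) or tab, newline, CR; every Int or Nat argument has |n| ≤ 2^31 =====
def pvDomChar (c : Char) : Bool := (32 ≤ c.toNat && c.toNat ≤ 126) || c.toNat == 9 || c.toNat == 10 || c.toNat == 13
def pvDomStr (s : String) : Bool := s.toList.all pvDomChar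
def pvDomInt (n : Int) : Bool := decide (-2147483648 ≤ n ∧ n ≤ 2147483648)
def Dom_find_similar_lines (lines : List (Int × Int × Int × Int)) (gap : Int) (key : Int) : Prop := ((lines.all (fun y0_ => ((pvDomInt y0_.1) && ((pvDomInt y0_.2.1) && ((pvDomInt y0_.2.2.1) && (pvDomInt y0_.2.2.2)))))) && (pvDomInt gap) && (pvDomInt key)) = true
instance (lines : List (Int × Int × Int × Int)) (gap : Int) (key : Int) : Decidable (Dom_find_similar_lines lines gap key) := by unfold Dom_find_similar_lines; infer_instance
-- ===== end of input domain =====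

-- B replaces A's per-row full n×n scan by sort + binary search: the indexes are sorted by the
-- key coordinate once, each row's candidates come from a binary-searched contiguous window,
-- only that window is filtered on the second coordinate, and the kept indexes are re-sorted.

-- Python tuple indexing t[i] (negative index from the end), shared primitive of both ports
def tupGetD (t : Int × Int × Int × Int) (i : Int) : Int :=
  PySem.List.pyGetD [t.1, t.2.1, t.2.2.1, t.2.2.2] i 0

-- ===== PORT A =====
def find_similar_lines (lines : List (Int × Int × Int × Int)) (gap : Int) (key : Int) : List (List Int) :=
  (PySem.List.pyRange 0 (lines.length : Int) 1).foldl (fun similar i =>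
    let li := PySem.List.pyGetD lines i (0, 0, 0, 0)
    let indexes := (PySem.List.pyRange 0 (lines.length : Int) 1).foldl (fun idxs j =>
      let lj := PySem.List.pyGetD lines j (0, 0, 0, 0)
      if li = lj then idxs
      else if tupGetD li key - gap ≤ tupGetD lj key ∧ tupGetD lj key ≤ tupGetD li key + gap ∧
              tupGetD li (key + 2) - gap ≤ tupGetD lj (key + 2) ∧ tupGetD lj (key + 2) ≤ tupGetD li (key + 2) + gap
      then idxs ++ [j] else idxs) [i]
    similar ++ [indexes]) []

-- ===== PORT B =====
-- hand-written _bisect_left of Source B (while lo < hi: mid = (lo+hi)//2; …)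
-- fuel (hi - lo at the call site) only makes the loop total; it strictly decreases each pass
def pvBsLo (a : List Int) (x : Int) : Nat → Nat → Nat → Nat
  | 0, lo, _hi => lo
  | fuel + 1, lo, hi =>
    if lo < hi then
      let mid := (lo + hi) / 2
      if a.getD mid 0 < x then pvBsLo a x fuel (mid + 1) hi else pvBsLo a x fuel lo mid
    else lo

-- hand-written _bisect_right of Source B
def pvBsHi (a : List Int) (x : Int) : Nat → Nat → Nat → Nat
  | 0, lo, _hi => lo
  | fuel + 1, lo, hi =>
    if lo < hi then
      let mid := (lo + hi) / 2
      if x < a.getD mid 0 then pvBsHi a x fuel lo mid else pvBsHi a x fuel (mid + 1) hi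
    else lo

def find_similar_lines_alt (lines : List (Int × Int × Int × Int)) (gap : Int) (key : Int) : List (List Int) :=
  let n := lines.length
  let order := PySem.List.sorted (PySem.List.pyRange 0 (n : Int) 1)
    (fun k => tupGetD (PySem.List.pyGetD lines k (0, 0, 0, 0)) key)
  let coords := order.map (fun k => tupGetD (PySem.List.pyGetD lines k (0, 0, 0, 0)) key)
  (PySem.List.pyRange 0 (n : Int) 1).foldl (fun similar i =>
    let li := PySem.List.pyGetD lines i (0, 0, 0, 0)
    let c := tupGetD li key
    let c2 := tupGetD li (key + 2)
    let lo := pvBsLo coords (c - gap) coords.length 0 coords.length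
    let hi := pvBsHi coords (c + gap) coords.length 0 coords.length
    let kept := (PySem.List.slice order (some (lo : Int)) (some (hi : Int))).filter (fun j =>
      let lj := PySem.List.pyGetD lines j (0, 0, 0, 0)
      decide (li ≠ lj) && decide (c2 - gap ≤ tupGetD lj (key + 2)) && decide (tupGetD lj (key + 2) ≤ c2 + gap))
    similar ++ [i :: PySem.List.sorted kept (fun x => x)]) []

-- ===== PRECONDITION & SPEC =====
-- Pre_ excludes inputs where indexing a 4-tuple with key (or key+2) out of range can raise
-- IndexError: A raises there except when the equality skip or short-circuiting hides the bad
-- index (all-duplicate lines, or key ∈ {2,3} with the first comparison always false), and on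
-- those inputs B's up-front sorting/indexing pass itself raises, so they stay outside Pre_.
def Pre_find_similar_lines (lines : List (Int × Int × Int × Int)) (gap : Int) (key : Int) : Prop :=
  (-4 ≤ key ∧ key ≤ 1) ∨ lines = []
instance (lines : List (Int × Int × Int × Int)) (gap : Int) (key : Int) : Decidable (Pre_find_similar_lines lines gap key) := by unfold Pre_find_similar_lines; infer_instance

def pvWitness_find_similar_lines : (List (Int × Int × Int × Int)) × Int × Int :=
  ([(0, 0, 0, 0), (1, 0, 1, 0)], 2, 0)

def Spec_find_similar_lines (lines : List (Int × Int × Int × Int)) (gap : Int) (key : Int) (out : List (List Int)) : Prop := out = find_similar_lines_alt lines gap key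
instance (lines : List (Int × Int × Int × Int)) (gap : Int) (key : Int) (out : List (List Int)) : Decidable (Spec_find_similar_lines lines gap key out) := by unfold Spec_find_similar_lines; infer_instance

-- ===== CLAIM (what is proved, stated in full; the proofs are below) =====
def Claim_equal_find_similar_lines : Prop := ∀ (lines : List (Int × Int × Int × Int)) (gap : Int) (key : Int), Dom_find_similar_lines lines gap key → Pre_find_similar_lines lines gap key → Spec_find_similar_lines lines gap key (find_similar_lines lines gap key)

-- ===== LEMMAS AND PROOFS =====

def pvC (lines : List (Int × Int × Int × Int)) (gap : Int) (key : Int) (i j : Nat) : Bool :=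
  let li := lines.getD i (0, 0, 0, 0)
  let lj := lines.getD j (0, 0, 0, 0)
  decide (li ≠ lj ∧ tupGetD li key - gap ≤ tupGetD lj key ∧ tupGetD lj key ≤ tupGetD li key + gap ∧
    tupGetD li (key + 2) - gap ≤ tupGetD lj (key + 2) ∧ tupGetD lj (key + 2) ≤ tupGetD li (key + 2) + gap)

def pvRow (lines : List (Int × Int × Int × Int)) (gap : Int) (key : Int) (k : Nat) : List Int :=
  (k : Int) :: ((List.range lines.length).filter (pvC lines gap key k)).map (fun (j : Nat) => (j : Int))


-- A computes the rows of pvRow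
lemma portA_eq (lines : List (Int × Int × Int × Int)) (gap key : Int) :
    find_similar_lines lines gap key =
      (List.range lines.length).map (fun k => pvRow lines gap key k) := by
  unfold find_similar_lines
  rw [PySem.List.pyRange_zero_nat]
  rw [List.foldl_map, PySem.List.foldl_append_singleton_eq_map]
  simp only [List.nil_append]
  apply List.map_congr_left
  intro i _
  rw [List.foldl_map]
  rw [PySem.List.foldl_congr_mem _ _
      (fun (idxs : List Int) (k : Nat) => if pvC lines gap key i k then idxs ++ [(k : Int)] else idxs) _
      (by
        intro idxs j _
        simp only [PySem.List.pyGetD_natCast, pvC, decide_eq_true_eq]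
        split_ifs <;> first | rfl | tauto)]
  rw [PySem.List.foldl_append_if]
  simp [pvRow]

-- Int-index form of the condition, with row index i : Nat
def pvCI (lines : List (Int × Int × Int × Int)) (gap : Int) (key : Int) (i : Nat) (j : Int) : Bool :=
  let li := lines.getD i (0, 0, 0, 0)
  let lj := PySem.List.pyGetD lines j (0, 0, 0, 0)
  (decide (li ≠ lj) && decide (tupGetD li (key + 2) - gap ≤ tupGetD lj (key + 2)) &&
    decide (tupGetD lj (key + 2) ≤ tupGetD li (key + 2) + gap)) &&
  (decide (tupGetD li key - gap ≤ tupGetD (PySem.List.pyGetD lines j (0, 0, 0, 0)) key) &&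
   decide (tupGetD (PySem.List.pyGetD lines j (0, 0, 0, 0)) key ≤ tupGetD li key + gap))

lemma pvMono (a : List Int) (hs : a.Pairwise (· ≤ ·)) (p q : Nat) (hq : q < a.length) (hpq : p ≤ q) :
    a[p]'(by omega) ≤ a[q] := by
  rcases Nat.lt_or_ge p q with h | h
  · exact List.pairwise_iff_getElem.mp hs p q (by omega) hq h
  · have : p = q := by omega
    subst this; exact le_refl _

lemma pvBsLo_aux (a : List Int) (x : Int) (hs : a.Pairwise (· ≤ ·)) (fuel : Nat) :
    ∀ (lo hi : Nat), hi - lo ≤ fuel → lo ≤ hi → hi ≤ a.length →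
      (∀ p (hp : p < a.length), p < lo → a[p] < x) →
      (∀ p (hp : p < a.length), hi ≤ p → x ≤ a[p]) →
      pvBsLo a x fuel lo hi ≤ a.length ∧
      (∀ p (hp : p < a.length), p < pvBsLo a x fuel lo hi → a[p] < x) ∧
      (∀ p (hp : p < a.length), pvBsLo a x fuel lo hi ≤ p → x ≤ a[p]) := by
  induction fuel with
  | zero =>
      intro lo hi hfuel hlh hhl h1 h2
      simp only [pvBsLo]
      exact ⟨by omega, fun p hp hpl => h1 p hp hpl, fun p hp hpl => h2 p hp (by omega)⟩
  | succ f ih =>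
      intro lo hi hfuel hlh hhl h1 h2
      by_cases h : lo < hi
      · simp only [pvBsLo, if_pos h]
        have hmlen : (lo + hi) / 2 < a.length := by omega
        simp only [List.getD_eq_getElem a 0 hmlen]
        by_cases hc : a[(lo + hi) / 2] < x
        · rw [if_pos hc]
          exact ih ((lo + hi) / 2 + 1) hi (by omega) (by omega) hhl
            (fun p hp hpl => lt_of_le_of_lt (pvMono a hs p ((lo + hi) / 2) hmlen (by omega)) hc)
            h2
        · rw [if_neg hc]
          exact ih lo ((lo + hi) / 2) (by omega) (by omega) (by omega) h1
            (fun p hp hpl => le_trans (by omega) (pvMono a hs ((lo + hi) / 2) p hp hpl))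
      · simp only [pvBsLo, if_neg h]
        exact ⟨by omega, fun p hp hpl => h1 p hp hpl, fun p hp hpl => h2 p hp (by omega)⟩

lemma pvBsHi_aux (a : List Int) (x : Int) (hs : a.Pairwise (· ≤ ·)) (fuel : Nat) :
    ∀ (lo hi : Nat), hi - lo ≤ fuel → lo ≤ hi → hi ≤ a.length →
      (∀ p (hp : p < a.length), p < lo → a[p] ≤ x) →
      (∀ p (hp : p < a.length), hi ≤ p → x < a[p]) →
      pvBsHi a x fuel lo hi ≤ a.length ∧
      (∀ p (hp : p < a.length), p < pvBsHi a x fuel lo hi → a[p] ≤ x) ∧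
      (∀ p (hp : p < a.length), pvBsHi a x fuel lo hi ≤ p → x < a[p]) := by
  induction fuel with
  | zero =>
      intro lo hi hfuel hlh hhl h1 h2
      simp only [pvBsHi]
      exact ⟨by omega, fun p hp hpl => h1 p hp hpl, fun p hp hpl => h2 p hp (by omega)⟩
  | succ f ih =>
      intro lo hi hfuel hlh hhl h1 h2
      by_cases h : lo < hi
      · simp only [pvBsHi, if_pos h]
        have hmlen : (lo + hi) / 2 < a.length := by omega
        simp only [List.getD_eq_getElem a 0 hmlen]
        by_cases hc : x < a[(lo + hi) / 2]
        · rw [if_pos hc]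
          exact ih lo ((lo + hi) / 2) (by omega) (by omega) (by omega) h1
            (fun p hp hpl => lt_of_lt_of_le hc (pvMono a hs ((lo + hi) / 2) p hp hpl))
        · rw [if_neg hc]
          exact ih ((lo + hi) / 2 + 1) hi (by omega) (by omega) hhl
            (fun p hp hpl => le_trans (pvMono a hs p ((lo + hi) / 2) hmlen (by omega)) (by omega))
            h2
      · simp only [pvBsHi, if_neg h]
        exact ⟨by omega, fun p hp hpl => h1 p hp hpl, fun p hp hpl => h2 p hp (by omega)⟩

lemma pvSliceFilter {α : Type} (P : α → Bool) :
    ∀ (l : List α) (lo hi : Nat), (∀ p (hp : p < l.length), P l[p] = true ↔ lo ≤ p ∧ p < hi) →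
    (l.drop lo).take (hi - lo) = l.filter P := by
  intro l
  induction l with
  | nil => intro lo hi _; simp
  | cons x t ih =>
      intro lo hi h
      cases lo with
      | zero =>
          cases hi with
          | zero =>
              simp only [Nat.sub_self, List.take_zero]
              symm
              rw [List.filter_eq_nil_iff]
              intro a ha
              rcases List.mem_iff_getElem.mp ha with ⟨p, hp, rfl⟩
              intro hPa
              have := (h p hp).mp hPa
              omega
          | succ m =>
              simp only [List.drop_zero, Nat.sub_zero, List.take_succ_cons]
              have hx : P x = true := (h 0 (by simp)).mpr (by omega)
              rw [List.filter_cons_of_pos hx]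
              have hrec := ih 0 m (fun p hp => by
                have h2 := h (p + 1) (by simp only [List.length_cons]; omega)
                simp only [List.getElem_cons_succ] at h2
                rw [h2]
                constructor <;> (intro hh; omega))
              simpa using hrec
      | succ l0 =>
          simp only [List.drop_succ_cons]
          have hx : ¬ P x = true := by
            intro hPa
            have := (h 0 (by simp)).mp hPa
            omega
          rw [List.filter_cons_of_neg hx]
          have heq : hi - (l0 + 1) = (hi - 1) - l0 := by omega
          rw [heq]
          exact ih l0 (hi - 1) (fun p hp => by
            have h2 := h (p + 1) (by simp only [List.length_cons]; omega)
            simp only [List.getElem_cons_succ] at h2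
            rw [h2]
            constructor <;> (intro hh; omega))

lemma portB_eq (lines : List (Int × Int × Int × Int)) (gap key : Int) :
    find_similar_lines_alt lines gap key =
      (List.range lines.length).map (fun k => pvRow lines gap key k) := by
  simp only [find_similar_lines_alt]
  rw [PySem.List.pyRange_zero_nat, List.foldl_map, PySem.List.foldl_append_singleton_eq_map]
  simp only [List.nil_append]
  apply List.map_congr_left
  intro i hmem
  simp only [PySem.List.pyGetD_natCast, pvRow]
  congr 1
  set ckey : Int → Int := fun k => tupGetD (PySem.List.pyGetD lines k (0, 0, 0, 0)) key with hckey
  set order : List Int :=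
    PySem.List.sorted ((List.range lines.length).map (fun (k : Nat) => (k : Int))) ckey with horder
  set coords : List Int := order.map ckey with hcoords
  have hperm : order.Perm ((List.range lines.length).map (fun (k : Nat) => (k : Int))) := by
    rw [horder]; exact PySem.List.sorted_perm _ _ _
  have hsorted : coords.Pairwise (· ≤ ·) := by
    rw [hcoords, horder]; exact PySem.List.sorted_map_key_pairwise _ _
  set li := lines.getD i (0, 0, 0, 0) with hli
  set c : Int := tupGetD li key with hcdef
  set c2 : Int := tupGetD li (key + 2) with hc2def
  set lo := pvBsLo coords (c - gap) coords.length 0 coords.length with hlodef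
  set hi := pvBsHi coords (c + gap) coords.length 0 coords.length with hhidef
  obtain ⟨hloLen, hloLt, hloGe⟩ :=
    pvBsLo_aux coords (c - gap) hsorted coords.length 0 coords.length (by omega) (by omega)
      (le_refl _) (fun p hp hpl => by omega) (fun p hp hpl => by omega)
  obtain ⟨hhiLen, hhiLe, hhiGt⟩ :=
    pvBsHi_aux coords (c + gap) hsorted coords.length 0 coords.length (by omega) (by omega)
      (le_refl _) (fun p hp hpl => by omega) (fun p hp hpl => by omega)
  rw [← hlodef] at hloLen hloLt hloGe
  rw [← hhidef] at hhiLen hhiLe hhiGt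
  have hslice : PySem.List.slice order (some (lo : Int)) (some (hi : Int)) =
      order.filter (fun j => decide (c - gap ≤ ckey j) && decide (ckey j ≤ c + gap)) := by
    rw [PySem.List.slice_natCast]
    apply pvSliceFilter
    intro p hp
    have hclen : p < coords.length := by rw [hcoords]; simpa using hp
    have hcp : coords[p]'hclen = ckey (order[p]'hp) := by
      simp only [hcoords, List.getElem_map]
    constructor
    · intro hP
      simp only [Bool.and_eq_true, decide_eq_true_eq] at hP
      constructor
      · by_contra hcon
        have hx := hloLt p hclen (by omega)
        rw [hcp] at hx; omega
      · by_contra hcon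
        have hx := hhiGt p hclen (by omega)
        rw [hcp] at hx; omega
    · intro hpw
      have h1 := hloGe p hclen hpw.1
      have h2 := hhiLe p hclen hpw.2
      rw [hcp] at h1 h2
      simp only [Bool.and_eq_true, decide_eq_true_eq]
      exact ⟨h1, h2⟩
  rw [hslice, List.filter_filter]
  have hcondf : (fun (j : Int) =>
      (decide (li ≠ PySem.List.pyGetD lines j (0, 0, 0, 0)) &&
        decide (c2 - gap ≤ tupGetD (PySem.List.pyGetD lines j (0, 0, 0, 0)) (key + 2)) &&
        decide (tupGetD (PySem.List.pyGetD lines j (0, 0, 0, 0)) (key + 2) ≤ c2 + gap)) &&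
      (decide (c - gap ≤ ckey j) && decide (ckey j ≤ c + gap)))
      = pvCI lines gap key i := by
    funext j
    simp only [pvCI, hckey, hli, hcdef, hc2def]
  rw [hcondf]
  have hfmap : ((List.range lines.length).map (fun (k : Nat) => (k : Int))).filter
      (pvCI lines gap key i) =
      ((List.range lines.length).filter (pvC lines gap key i)).map (fun (j : Nat) => (j : Int)) := by
    rw [List.filter_map]
    congr 1
    apply List.filter_congr
    intro k _
    simp only [Function.comp_apply, pvCI, pvC, PySem.List.pyGetD_natCast]
    rw [Bool.eq_iff_iff]
    simp only [Bool.and_eq_true, decide_eq_true_eq]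
    constructor
    · rintro ⟨⟨⟨a1, a2⟩, a3⟩, a4, a5⟩
      exact ⟨a1, a4, a5, a2, a3⟩
    · rintro ⟨a1, a2, a3, a4, a5⟩
      exact ⟨⟨⟨a1, a4⟩, a5⟩, a2, a3⟩
  apply PySem.List.sorted_eq_of_perm_of_pairwise_lt
  · rw [← hfmap]
    exact (hperm.filter _).symm
  · have hp1 : ((List.range lines.length).filter (pvC lines gap key i)).Pairwise (· < ·) :=
      List.Pairwise.sublist List.filter_sublist List.pairwise_lt_range
    exact List.Pairwise.map _ (fun a b h => by exact_mod_cast h) hp1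

-- ===== VERDICT (by name: the statement is the Claim_ definition above) =====
theorem find_similar_lines_spec : Claim_equal_find_similar_lines := by
  intro lines gap key _ _
  unfold Spec_find_similar_lines
  rw [portA_eq, portB_eq]
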